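-- pv_equiv track=rewrite | github.com/BJTU-LiuHe/DPGM | CUB_2011.py | _gen_edge_dict
-- ===== SOURCE A (Python) =====
-- def _gen_edge_dict(tails, heads):
--     num_edges = len(tails)
--     edge_dict = dict()
--     for idx in range(num_edges):
--         tail = tails[idx]
--         head = heads[idx]
--         if not tail in edge_dict.keys():
--             edge_dict[tail] = [head]
--         else:
--             edge_dict[tail].append(head)
--
--     return edge_dict
-- ===== SOURCE B (Python) =====
-- def _gen_edge_dict(tails, heads):
--     pairs = list(zip(tails, heads))
--     return {t: [h for tt, h in pairs if tt == t] for t in dict.fromkeys(tails)}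
-- ===== Notes on version B (the rewrite author's own statement) =====
-- stated objective: simpler
-- what changed: Replaces the index loop that mutates a dict (membership test + insert-or-append) with a declarative grouping: dedup the tails in first-occurrence order and build each bucket by one comprehension over the zipped (tail, head) pairs.
import Mathlib
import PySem

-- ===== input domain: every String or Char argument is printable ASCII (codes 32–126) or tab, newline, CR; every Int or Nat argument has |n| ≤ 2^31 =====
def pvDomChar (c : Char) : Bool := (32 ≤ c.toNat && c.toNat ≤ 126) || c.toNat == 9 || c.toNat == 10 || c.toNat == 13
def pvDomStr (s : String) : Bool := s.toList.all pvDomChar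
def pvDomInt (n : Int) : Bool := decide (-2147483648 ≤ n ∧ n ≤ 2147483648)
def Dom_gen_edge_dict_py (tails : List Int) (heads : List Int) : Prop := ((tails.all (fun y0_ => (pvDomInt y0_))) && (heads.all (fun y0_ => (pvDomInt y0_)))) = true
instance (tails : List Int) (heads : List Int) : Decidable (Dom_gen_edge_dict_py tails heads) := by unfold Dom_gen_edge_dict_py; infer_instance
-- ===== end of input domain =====

-- B groups heads per distinct tail (ordered dedup + per-key comprehension over the zipped
-- pairs) instead of A's index loop mutating a dict; objective: simpler, not faster.

-- ===== PORT A =====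
def gen_edge_dict_py (tails : List Int) (heads : List Int) : List (Int × List Int) :=
  let num_edges : Int := tails.length
  let d := (PySem.List.pyRange 0 num_edges 1).foldl
    (fun (d : PySem.Dict Int (List Int)) idx =>
      let tail := PySem.List.pyGetD tails idx 0
      let head := PySem.List.pyGetD heads idx 0
      if !(d.contains tail) then d.insert tail [head]
      else d.modify tail [] (fun v => v ++ [head]))
    PySem.Dict.empty
  d.items

-- ===== PORT B =====
def gen_edge_dict_py_alt (tails : List Int) (heads : List Int) : List (Int × List Int) :=
  let pairs := tails.zip heads
  (PySem.List.dedup tails).map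
    (fun t => (t, (pairs.filter (fun p => p.1 == t)).map (·.2)))

-- ===== PRECONDITION & SPEC =====
-- Pre_ excludes exactly the inputs where A raises IndexError (heads shorter than tails).
def Pre_gen_edge_dict_py (tails : List Int) (heads : List Int) : Prop :=
  tails.length ≤ heads.length
instance (tails : List Int) (heads : List Int) : Decidable (Pre_gen_edge_dict_py tails heads) := by unfold Pre_gen_edge_dict_py; infer_instance
def pvWitness_gen_edge_dict_py : List Int × List Int := ([1, 2, 1], [5, 6, 7])

def Spec_gen_edge_dict_py (tails : List Int) (heads : List Int) (out : List (Int × List Int)) : Prop := out = gen_edge_dict_py_alt tails heads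
instance (tails : List Int) (heads : List Int) (out : List (Int × List Int)) : Decidable (Spec_gen_edge_dict_py tails heads out) := by unfold Spec_gen_edge_dict_py; infer_instance

-- ===== CLAIM (what is proved, stated in full; the proofs are below) =====
def Claim_equal_gen_edge_dict_py : Prop := ∀ (tails : List Int) (heads : List Int), Dom_gen_edge_dict_py tails heads → Pre_gen_edge_dict_py tails heads → Spec_gen_edge_dict_py tails heads (gen_edge_dict_py tails heads)

-- ===== LEMMAS AND PROOFS =====

-- A's per-index loop body equals an unconditional `modify` (which inserts on a missing key).
theorem pv_step_eq_modify (d : PySem.Dict Int (List Int)) (t : Int) (h : Int) :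
    (if !(d.contains t) then d.insert t [h] else d.modify t [] (fun v => v ++ [h]))
      = d.modify t [] (fun v => v ++ [h]) := by
  by_cases hc : d.contains t
  · simp [hc]
  · simp only [Bool.not_eq_true] at hc
    simp [hc, PySem.Dict.modify, PySem.Dict.getD_of_not_contains d [] hc]

-- Reading the two lists at index j (for 0 ≤ j < len tails ≤ len heads) is reading the zip.
theorem pv_map_range_eq_zip (tails heads : List Int) (hlen : tails.length ≤ heads.length) :
    (PySem.List.pyRange 0 (tails.length : Int) 1).map
        (fun j => (PySem.List.pyGetD tails j 0, PySem.List.pyGetD heads j 0))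
      = tails.zip heads := by
  apply List.ext_getElem
  · simp [PySem.List.length_pyRange_one, List.length_zip]
    omega
  · intro k h1 h2
    have hk : k < tails.length := by
      simpa [PySem.List.length_pyRange_one] using h1
    have hk2 : k < heads.length := lt_of_lt_of_le hk hlen
    simp only [List.getElem_map, PySem.List.getElem_pyRange_one, List.getElem_zip]
    rw [show (0 : Int) + k = ((k : Nat) : Int) by omega]
    rw [PySem.List.pyGetD_natCast, PySem.List.pyGetD_natCast]
    simp [List.getD, hk, hk2]

-- ===== VERDICT (by name: the statement is the Claim_ definition above) =====
theorem gen_edge_dict_py_spec : Claim_equal_gen_edge_dict_py := by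
  intro tails heads _ hpre
  unfold Spec_gen_edge_dict_py gen_edge_dict_py gen_edge_dict_py_alt
  simp only
  -- collapse the branch to a single modify
  have hbody :
      (PySem.List.pyRange 0 (tails.length : Int) 1).foldl
        (fun (d : PySem.Dict Int (List Int)) idx =>
          let tail := PySem.List.pyGetD tails idx 0
          let head := PySem.List.pyGetD heads idx 0
          if !(d.contains tail) then d.insert tail [head]
          else d.modify tail [] (fun v => v ++ [head]))
        PySem.Dict.empty
      = (tails.zip heads).foldl
          (fun (d : PySem.Dict Int (List Int)) p => d.modify p.1 [] (fun v => v ++ [p.2]))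
          PySem.Dict.empty := by
    rw [← pv_map_range_eq_zip tails heads hpre, List.foldl_map]
    apply PySem.List.foldl_congr_mem
    intro d j _
    exact pv_step_eq_modify d _ _
  rw [hbody]
  set L := (tails.zip heads).foldl
      (fun (d : PySem.Dict Int (List Int)) p => d.modify p.1 [] (fun v => v ++ [p.2]))
      PySem.Dict.empty with hL
  have hnodup : L.keys.Nodup := by
    rw [hL]
    exact PySem.Dict.nodup_keys_foldl_modify_key _ _ _ _ _ PySem.Dict.nodup_keys_empty
  have hkeys : L.keys = PySem.List.dedup tails := by
    rw [hL, PySem.Dict.keys_foldl_modify_key]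
    rw [List.map_fst_zip hpre]
    simp [PySem.Set.update_nil_left, PySem.List.dedup]
  rw [PySem.Dict.items_eq_map_keys L hnodup [], hkeys]
  apply List.map_congr_left
  intro t _
  have hval : L.getD t [] = ((tails.zip heads).filter (fun p => p.1 == t)).map (·.2) := by
    rw [hL]
    simpa using PySem.Dict.getD_foldl_modify_append (tails.zip heads) PySem.Dict.empty t
  rw [hval]
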